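-- pv_equiv track=rewrite | github.com/alexeybutyrev/codeforcessolutions | 1557B.py | solution
-- ===== SOURCE A (Python) =====
-- from math import inf
-- from collections import defaultdict
--
-- def solution(A, k):
--     # The idea is we find followers in the soreted array and if in the orriginal array that doesn't work we make a cut
--     # then we check if we used more cuts than needed
--     N = len(A)
--     if N == k:
--         return "YES"
--
--     B = sorted(A)
--
--     followers = defaultdict(lambda: inf)
--     for i in range(N - 1):
--         followers[B[i]] = B[i + 1]
--
--     c = 1
--     for i in range(1, N):
--         if followers[A[i - 1]] != A[i]:
--             c += 1
--     return "YES" if c <= k else "NO"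
-- ===== SOURCE B (Python) =====
-- def solution(A, k):
--     n = len(A)
--     if n == k:
--         return "YES"
--     B = sorted(A)
--     cuts = 1
--     for prev, cur in zip(A, A[1:]):
--         lo, hi = 0, n
--         while lo < hi:
--             mid = (lo + hi) // 2
--             if B[mid] <= prev:
--                 lo = mid + 1
--             else:
--                 hi = mid
--         if lo == n or B[lo] != cur:
--             cuts += 1
--     return "YES" if cuts <= k else "NO"
-- ===== Notes on version B (the rewrite author's own statement) =====
-- stated objective: alternative
-- what changed: B drops A's precomputed defaultdict of successors and instead does a per-pair binary search (hand-rolled bisect_right) into the sorted array; Pre_ excludes lists with two adjacent equal maximal elements, on which A's dict-overwrite successor of the maximum is accidental - the source Codeforces problem guarantees pairwise-distinct elements.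
-- outside the precondition, e.g. on solution([5, 5], 1): A returns 'YES', B returns 'NO'; on solution([1, 2, 2], 1): A returns 'YES', B returns 'NO'
import Mathlib
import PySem

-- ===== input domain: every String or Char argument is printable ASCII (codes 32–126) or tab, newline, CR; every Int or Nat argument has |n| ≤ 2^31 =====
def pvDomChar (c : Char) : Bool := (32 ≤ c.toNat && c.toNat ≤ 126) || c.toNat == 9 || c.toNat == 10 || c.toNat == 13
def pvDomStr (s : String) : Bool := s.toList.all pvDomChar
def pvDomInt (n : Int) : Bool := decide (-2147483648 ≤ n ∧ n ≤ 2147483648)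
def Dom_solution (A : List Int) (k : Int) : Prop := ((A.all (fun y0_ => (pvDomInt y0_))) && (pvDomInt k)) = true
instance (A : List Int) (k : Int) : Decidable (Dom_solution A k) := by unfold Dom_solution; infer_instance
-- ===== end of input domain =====

-- B replaces A's precomputed successor dictionary with a per-pair binary search into
-- the sorted array (objective: alternative decomposition; similar cost, no dict).

-- ===== PORT A =====
def solution (A : List Int) (k : Int) : String :=
  let N : Int := PySem.List.len A
  if N = k then "YES"
  else
    let B := PySem.List.sorted A (fun x => x)
    let followers : PySem.Dict Int Int :=
      (PySem.List.pyRange 0 (N - 1)).foldl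
        (fun d i => d.insert (PySem.List.pyGetD B i 0) (PySem.List.pyGetD B (i + 1) 0))
        PySem.Dict.empty
    -- defaultdict(lambda: inf): a missing key reads as inf, which is unequal to every
    -- int, so `followers[A[i-1]] != A[i]` is exactly `get? … ≠ some (A[i])`.
    let c : Int :=
      (PySem.List.pyRange 1 N).foldl
        (fun c i =>
          if followers.get? (PySem.List.pyGetD A (i - 1) 0) ≠ some (PySem.List.pyGetD A i 0)
          then c + 1 else c) 1
    if c ≤ k then "YES" else "NO"

-- ===== PORT B =====
-- Source B's inner `while lo < hi` binary search; lo and hi stay in [0, len B], so Nat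
-- indices with getD are exact for Python's B[mid] here.
def bisectLoop (B : List Int) (x : Int) (lo hi : Nat) : Nat :=
  if lo < hi then
    let mid := (lo + hi) / 2
    if B.getD mid 0 ≤ x then bisectLoop B x (mid + 1) hi else bisectLoop B x lo mid
  else lo
termination_by hi - lo
decreasing_by all_goals omega

def solution_alt (A : List Int) (k : Int) : String :=
  let n : Int := PySem.List.len A
  if n = k then "YES"
  else
    let B := PySem.List.sorted A (fun x => x)
    let cuts : Int :=
      (A.zip (A.drop 1)).foldl
        (fun c p =>
          let lo := bisectLoop B p.1 0 A.length
          -- Python short-circuits `lo == n or B[lo] != cur`, so B[lo] is only read in range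
          if lo = A.length ∨ B.getD lo 0 ≠ p.2 then c + 1 else c) 1
    if cuts ≤ k then "YES" else "NO"

-- ===== PRECONDITION & SPEC =====
-- Pre_ excludes lists in which two adjacent elements are equal and maximal: there A's
-- defaultdict successor of the maximum is an accident of dict overwriting (the source
-- problem guarantees pairwise-distinct elements, so no such list is a real input).
def Pre_solution (A : List Int) (k : Int) : Prop :=
  ∀ p ∈ A.zip (A.drop 1), ¬ (p.1 = p.2 ∧ ∀ z ∈ A, z ≤ p.1)
instance (A : List Int) (k : Int) : Decidable (Pre_solution A k) := by unfold Pre_solution; infer_instance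
def pvWitness_solution : List Int × Int := ([3, 1, 2], 2)
def Spec_solution (A : List Int) (k : Int) (out : String) : Prop := out = solution_alt A k
instance (A : List Int) (k : Int) (out : String) : Decidable (Spec_solution A k out) := by unfold Spec_solution; infer_instance

-- ===== CLAIM (what is proved, stated in full; the proofs are below) =====
def Claim_equal_solution : Prop := ∀ (A : List Int) (k : Int), Dom_solution A k → Pre_solution A k → Spec_solution A k (solution A k)

-- ===== LEMMAS AND PROOFS =====

-- countP (≤ v) splits into countP (< v) plus the multiplicity of v
theorem countP_le_split (l : List Int) (v : Int) :
    l.countP (fun z => decide (z ≤ v)) = l.countP (fun z => decide (z < v)) + l.count v := by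
  induction l with
  | nil => simp
  | cons a t ih =>
    simp only [List.countP_cons, List.count_cons, ih, beq_iff_eq]
    by_cases h1 : a ≤ v <;> by_cases h2 : a < v <;> by_cases h3 : a = v <;>
      simp [h1, h2, h3] <;> omega

-- on a sorted list, a downward-closed predicate holds at index j iff j < countP
theorem sorted_getD_iff (p : Int → Bool) (hp : ∀ a b : Int, a ≤ b → p b = true → p a = true) :
    ∀ (B : List Int), B.Pairwise (fun a b : Int => a ≤ b) →
      ∀ j, j < B.length → (p (B.getD j 0) = true ↔ j < B.countP p) := by
  intro B
  induction B with
  | nil => intro _ j hj; simp at hj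
  | cons b t ih =>
    intro hs j hj
    rcases List.pairwise_cons.mp hs with ⟨hb, ht⟩
    cases j with
    | zero =>
      simp only [List.getD_cons_zero, List.countP_cons]
      constructor
      · intro h; simp [h]
      · intro h
        by_contra hpb
        have hpb' : p b = false := by simpa using hpb
        have h0 : t.countP p = 0 := List.countP_eq_zero.mpr (fun a ha hpa => by
          have := hp b a (hb a ha) hpa
          simp [hpb'] at this)
        simp [h0, hpb'] at h
    | succ m =>
      have hm : m < t.length := by simpa using hj
      have iht := ih ht m hm
      have hmem : t.getD m 0 ∈ t := by
        rw [List.getD_eq_getElem t 0 hm]; exact List.getElem_mem hm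
      simp only [List.getD_cons_succ, List.countP_cons]
      by_cases hpb : p b = true
      · rw [iht]; simp [hpb]
      · constructor
        · intro h; exact absurd (hp b _ (hb _ hmem) h) hpb
        · intro h
          apply iht.mpr
          simp [hpb] at h
          omega

-- pyRange 1 N enumerated as a mapped List.range
theorem pyRange_one_eq (n : Nat) :
    PySem.List.pyRange 1 (n : Int) = List.map (fun j : Nat => (j : Int) + 1) (List.range (n - 1)) := by
  induction n with
  | zero => rfl
  | succ m ih =>
    cases m with
    | zero => rfl
    | succ m' =>
      have h1 : ((m' + 1 + 1 : Nat) : Int) = ((m' + 1 : Nat) : Int) + 1 := by push_cast; ring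
      rw [h1, PySem.List.pyRange_one_succ_right (by push_cast; omega), ih]
      simp [List.range_succ]

-- adjacent pairs as a mapped index range
theorem zip_tail_eq_map_range (xs : List Int) :
    xs.zip (xs.drop 1) =
      (List.range (xs.length - 1)).map (fun j => (xs.getD j 0, xs.getD (j + 1) 0)) := by
  apply List.ext_getElem
  · simp [List.length_zip]
  · intro j h1 h2
    have hj : j < xs.length - 1 := by simpa using h1
    simp [List.getElem_zip, List.getD_eq_getElem?_getD,
      List.getElem?_eq_getElem (show j < xs.length by omega),
      List.getElem?_eq_getElem (show j + 1 < xs.length by omega)]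

-- the successor dictionary built over range m, characterised by counts (sorted B)
theorem dictFold_get? (B : List Int) (hs : B.Pairwise (fun a b : Int => a ≤ b))
    (m : Nat) (hm : m ≤ B.length) (x : Int) :
    (((List.range m).foldl
        (fun d j => d.insert (B.getD j 0) (B.getD (j + 1) 0)) PySem.Dict.empty).get? x) =
      if B.countP (fun z => decide (z < x)) < min m (B.countP (fun z => decide (z ≤ x)))
      then some (B.getD (min m (B.countP (fun z => decide (z ≤ x)))) 0)
      else none := by
  induction m with
  | zero => simp [PySem.Dict.get?_empty]
  | succ m ih =>
    have hmB : m < B.length := by omega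
    rw [List.range_succ, List.foldl_append, List.foldl_cons, List.foldl_nil,
      PySem.Dict.get?_insert, ih (by omega)]
    set lx := B.countP (fun z => decide (z < x)) with hlx
    set cx := B.countP (fun z => decide (z ≤ x)) with hcx
    have hmono : lx ≤ cx :=
      List.countP_mono_left (fun a _ h => by simp at h ⊢; omega)
    have hle : (B.getD m 0 ≤ x) ↔ m < cx := by
      simpa using sorted_getD_iff (fun z => decide (z ≤ x))
        (fun a b hab h => by simp at h ⊢; omega) B hs m hmB
    have hlt : (B.getD m 0 < x) ↔ m < lx := by
      simpa using sorted_getD_iff (fun z => decide (z < x))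
        (fun a b hab h => by simp at h ⊢; omega) B hs m hmB
    by_cases hx : x = B.getD m 0
    · have h1 : m < cx := hle.mp (le_of_eq hx.symm)
      have h2 : ¬ m < lx := fun h => lt_irrefl x (hx ▸ hlt.mpr h)
      rw [if_pos hx]
      have hmin : min (m + 1) cx = m + 1 := by omega
      rw [hmin, if_pos (by omega)]
    · rw [if_neg hx]
      have hkey : m < lx ∨ cx ≤ m := by
        by_contra hcon
        simp only [not_or, not_lt, not_le] at hcon
        rcases hcon with ⟨ha, hb2⟩
        have hle' := hle.mpr hb2
        have hnlt : ¬ B.getD m 0 < x := fun h => by have := hlt.mp h; omega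
        exact hx (by omega)
      rcases hkey with h8 | h7
      · have e1 : min m cx = m := by omega
        have e2 : min (m + 1) cx = m + 1 := by omega
        rw [e1, e2, if_neg (by omega), if_neg (by omega)]
      · have e1 : min m cx = cx := by omega
        have e2 : min (m + 1) cx = cx := by omega
        rw [e1, e2]

-- the binary search computes countP (≤ x) on a sorted list
theorem bisectLoop_eq (B : List Int) (hs : B.Pairwise (fun a b : Int => a ≤ b)) (x : Int) :
    ∀ d lo hi, hi - lo = d → lo ≤ B.countP (fun z => decide (z ≤ x)) →
      B.countP (fun z => decide (z ≤ x)) ≤ hi → hi ≤ B.length →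
      bisectLoop B x lo hi = B.countP (fun z => decide (z ≤ x)) := by
  intro d
  induction d using Nat.strong_induction_on with
  | _ d ih =>
    intro lo hi hd hlo hhi hlen
    rw [bisectLoop]
    by_cases h : lo < hi
    · rw [if_pos h]
      have hmid : (lo + hi) / 2 < B.length := by omega
      have hiff : (B.getD ((lo + hi) / 2) 0 ≤ x) ↔ (lo + hi) / 2 < B.countP (fun z => decide (z ≤ x)) := by
        simpa using sorted_getD_iff (fun z => decide (z ≤ x))
          (fun a b hab hb => by simp at hb ⊢; omega) B hs _ hmid
      by_cases hc : B.getD ((lo + hi) / 2) 0 ≤ x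
      · rw [if_pos hc]
        exact ih (hi - ((lo + hi) / 2 + 1)) (by omega) _ _ rfl (by have := hiff.mp hc; omega) hhi hlen
      · rw [if_neg hc]
        have : ¬ (lo + hi) / 2 < B.countP (fun z => decide (z ≤ x)) := fun hq => hc (hiff.mpr hq)
        exact ih ((lo + hi) / 2 - lo) (by omega) _ _ rfl hlo (by omega) (by omega)
    · rw [if_neg h]
      omega

-- the per-pair conditions of the two programs agree unless x = y is the maximum
theorem pair_cond_iff (A : List Int) (x y : Int) (hx : x ∈ A)
    (hnm : ¬ (x = y ∧ ∀ z ∈ A, z ≤ x)) :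
    (¬ (((List.range (A.length - 1)).foldl
        (fun d j => d.insert ((PySem.List.sorted A (fun z => z)).getD j 0)
                             ((PySem.List.sorted A (fun z => z)).getD (j + 1) 0))
        PySem.Dict.empty).get? x) = some y)
    ↔ (bisectLoop (PySem.List.sorted A (fun z => z)) x 0 A.length = A.length ∨
        (PySem.List.sorted A (fun z => z)).getD
          (bisectLoop (PySem.List.sorted A (fun z => z)) x 0 A.length) 0 ≠ y) := by
  set B := PySem.List.sorted A (fun z => z) with hB
  have hs : B.Pairwise (fun a b : Int => a ≤ b) := PySem.List.sorted_pairwise A _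
  have hperm : B.Perm A := PySem.List.sorted_perm A _ _
  have hlen : B.length = A.length := hperm.length_eq
  have hxB : x ∈ B := hperm.mem_iff.mpr hx
  set lx := B.countP (fun z => decide (z < x)) with hlxd
  set cx := B.countP (fun z => decide (z ≤ x)) with hcxd
  have hcpos : 0 < B.count x := List.count_pos_iff.mpr hxB
  have hsplit : cx = lx + B.count x := by rw [hcxd, countP_le_split]
  have hcx_le : cx ≤ B.length := List.countP_le_length
  have hbis : bisectLoop B x 0 A.length = cx := by
    rw [← hlen]
    exact bisectLoop_eq B hs x B.length 0 B.length rfl (by omega) hcx_le le_rfl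
  have hdict := dictFold_get? B hs (A.length - 1) (by omega) x
  rw [hbis, hdict, ← hlxd, ← hcxd]
  have hn1 : 1 ≤ A.length := by
    have := List.length_pos_of_mem hxB; omega
  by_cases hfull : cx = A.length
  · -- x is the maximum value; Pre_ rules out y = x, so both sides report a break
    have hmax : ∀ z ∈ A, z ≤ x := by
      intro z hz
      have hall := List.countP_eq_length.mp (by rw [← hcxd, hfull, ← hlen])
      have := hall z (hperm.mem_iff.mpr hz)
      simpa using this
    have hxy : ¬ x = y := fun h => hnm ⟨h, hmax⟩
    have hmin : min (A.length - 1) cx = A.length - 1 := by omega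
    rw [hmin]
    constructor
    · intro _; exact Or.inl hfull
    · intro _
      by_cases hcond : lx < A.length - 1
      · rw [if_pos hcond]
        have hlast : B.getD (A.length - 1) 0 = x := by
          have h1 : B.getD (A.length - 1) 0 ≤ x := by
            have := (sorted_getD_iff (fun z => decide (z ≤ x))
              (fun a b hab hb => by simp at hb ⊢; omega) B hs (A.length - 1) (by omega)).mpr
              (by rw [← hcxd]; omega)
            simpa using this
          have h2 : ¬ B.getD (A.length - 1) 0 < x := by
            intro hlt
            have := (sorted_getD_iff (fun z => decide (z < x))
              (fun a b hab hb => by simp at hb ⊢; omega) B hs (A.length - 1) (by omega)).mp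
              (by simpa using hlt)
            rw [← hlxd] at this; omega
          omega
        rw [hlast]
        intro hsome
        exact hxy (Option.some_inj.mp hsome)
      · rw [if_neg hcond]
        simp
  · have hcxlt : cx < A.length := by omega
    have hmin : min (A.length - 1) cx = cx := by omega
    rw [hmin, if_pos (by omega)]
    constructor
    · intro hne
      refine Or.inr (fun he => hne ?_)
      exact congrArg some he
    · rintro (h1 | h2)
      · omega
      · intro hsome
        exact h2 (Option.some_inj.mp hsome)

-- main equivalence on inputs without an adjacent maximal duplicate
theorem solution_eq_alt (A : List Int) (k : Int)
    (hpre : ∀ p ∈ A.zip (A.drop 1), ¬ (p.1 = p.2 ∧ ∀ z ∈ A, z ≤ p.1)) :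
    solution A k = solution_alt A k := by
  by_cases hA : A = []
  · subst hA; rfl
  · have hn1 : 1 ≤ A.length := List.length_pos_of_ne_nil hA
    dsimp only [solution, solution_alt, PySem.List.len_eq]
    by_cases hk : (A.length : Int) = k
    · rw [if_pos hk, if_pos hk]
    · rw [if_neg hk, if_neg hk]
      refine congrArg (fun c : Int => if c ≤ k then "YES" else "NO") ?_
      have hN1 : ((A.length : Int) - 1) = ((A.length - 1 : Nat) : Int) := by omega
      rw [hN1, PySem.List.pyRange_zero_natCast, List.foldl_map]
      have hcast : ∀ j : Nat, ((j : Int) + 1) = ((j + 1 : Nat) : Int) := by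
        intro j; push_cast; ring
      have hcast3 : ∀ j : Nat, (((j + 1 : Nat) : Int) - 1) = (j : Int) := by
        intro j; push_cast; ring
      simp only [hcast, hcast3, PySem.List.pyGetD_natCast, Option.getD_some]
      rw [pyRange_one_eq A.length, List.foldl_map]
      simp only [hcast, hcast3, PySem.List.pyGetD_natCast, Option.getD_some]
      rw [zip_tail_eq_map_range A, List.foldl_map]
      refine PySem.List.foldl_congr_mem _ _ _ _ ?_
      intro c j hj
      have hjlt : j < A.length - 1 := List.mem_range.mp hj
      have hxmem : A.getD j 0 ∈ A := by
        rw [List.getD_eq_getElem A 0 (by omega)]; exact List.getElem_mem _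
      have hmemzip : (A.getD j 0, A.getD (j + 1) 0) ∈ A.zip (A.drop 1) := by
        rw [zip_tail_eq_map_range A]
        exact List.mem_map.mpr ⟨j, List.mem_range.mpr hjlt, rfl⟩
      have hiff := pair_cond_iff A (A.getD j 0) (A.getD (j + 1) 0) hxmem
        (hpre _ hmemzip)
      by_cases hc : ¬ (((List.range (A.length - 1)).foldl
          (fun d j => d.insert ((PySem.List.sorted A (fun z => z)).getD j 0)
                               ((PySem.List.sorted A (fun z => z)).getD (j + 1) 0))
          PySem.Dict.empty).get? (A.getD j 0)) = some (A.getD (j + 1) 0)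
      · rw [if_pos hc, if_pos (hiff.mp hc)]
      · rw [if_neg hc, if_neg (fun hq => hc (hiff.mpr hq))]

-- ===== VERDICT (by name: the statement is the Claim_ definition above) =====
theorem solution_spec : Claim_equal_solution := by
  intro A k _ hpre
  show solution A k = solution_alt A k
  exact solution_eq_alt A k hpre
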